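-- pv_equiv track=rewrite | github.com/eunhee-dev/problem-solving | 0x10_dynamic-programming/11727/solve.py | solve
-- ===== SOURCE A (Python) =====
-- MOD = 10007
--
-- def solve(n: int) -> int:
--     if n == 1:
--         return 1
--
--     dp = [0] * (n + 1)
--     dp[1] = 1
--     dp[2] = 3
--
--     for i in range(3, n + 1):
--         dp[i] = (dp[i - 1] + 2 * dp[i - 2]) % MOD
--
--     return dp[n]
-- ===== SOURCE B (Python) =====
-- MOD = 10007
--
-- def solve(n: int) -> int:
--     # closed form: a(n) = (2**(n+1) + (-1)**n) / 3, taken mod 10007 (3336 = 3^-1 mod 10007)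
--     sign = 1 if n % 2 == 0 else -1
--     return (pow(2, n + 1, MOD) + sign) * 3336 % MOD
-- ===== Notes on version B (the rewrite author's own statement) =====
-- stated objective: faster
-- what changed: Replaces the O(n) DP-array loop by the closed form a(n) = (2^(n+1) + (-1)^n) * 3^{-1} mod 10007, computed with one modular exponentiation.
import Mathlib
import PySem

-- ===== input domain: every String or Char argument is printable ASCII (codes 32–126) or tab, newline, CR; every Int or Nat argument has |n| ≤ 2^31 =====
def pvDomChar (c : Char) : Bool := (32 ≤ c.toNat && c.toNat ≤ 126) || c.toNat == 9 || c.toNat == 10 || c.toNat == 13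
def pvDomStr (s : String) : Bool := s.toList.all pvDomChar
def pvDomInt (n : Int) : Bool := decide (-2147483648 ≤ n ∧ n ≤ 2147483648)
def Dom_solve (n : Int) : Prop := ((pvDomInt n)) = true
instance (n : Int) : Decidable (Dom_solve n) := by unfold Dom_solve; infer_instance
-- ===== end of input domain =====

-- B replaces the O(n) DP-array loop by the closed form a(n) = (2^(n+1) + (-1)^n)·3⁻¹ mod 10007
-- computed with one modular exponentiation (objective: faster).

-- ===== PORT A =====
-- A Python list is a mutable array: dp is ported as a Lean Array. Every index A uses (1, 2,
-- i-2 … i, n) is nonnegative and in range for every admitted input (1 ≤ n, n ≠ 1 in this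
-- branch), so `.toNat` with setIfInBounds/getD is exact there.
def solve (n : Int) : Int :=
  if n = 1 then 1
  else
    let dp : Array Int := Array.replicate (n + 1).toNat 0
    let dp := dp.setIfInBounds 1 1
    let dp := dp.setIfInBounds 2 3
    let dp := (PySem.List.pyRange 3 (n + 1) 1).foldl
      (fun dp i => dp.setIfInBounds i.toNat
        (PySem.Int.mod (dp.getD (i - 1).toNat 0 + 2 * dp.getD (i - 2).toNat 0) 10007))
      dp
    dp.getD n.toNat 0

-- ===== PORT B =====
-- hand port of Python's three-argument pow(b, e, m) for m = 10007, e ≥ 0: square-and-multiply,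
-- reducing mod 10007 at every step — exact (pow(b, 0, m) = 1 % m; b^e mod m otherwise)
def powMod10007 (b : Int) (e : Nat) : Int :=
  if e = 0 then PySem.Int.mod 1 10007
  else
    let h := powMod10007 b (e / 2)
    let h2 := PySem.Int.mod (h * h) 10007
    if e % 2 = 1 then PySem.Int.mod (h2 * b) 10007 else h2

-- Python's pow(2, e, 10007) with e < 0 is pow(2⁻¹ mod 10007, -e, 10007); 5004 = 2⁻¹ mod 10007 (exact).
def solve_alt (n : Int) : Int :=
  let sign : Int := if PySem.Int.mod n 2 = 0 then 1 else -1
  let p : Int :=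
    if 0 ≤ n + 1 then powMod10007 2 (n + 1).toNat
    else powMod10007 5004 (-(n + 1)).toNat
  PySem.Int.mod ((p + sign) * 3336) 10007

-- ===== PRECONDITION & SPEC =====
-- Pre_ excludes exactly n ≤ 0, where A raises IndexError (dp[1] = 1 on a list of length ≤ 1).
def Pre_solve (n : Int) : Prop := 1 ≤ n
instance (n : Int) : Decidable (Pre_solve n) := by unfold Pre_solve; infer_instance
def pvWitness_solve : Int := (5)

def Spec_solve (n : Int) (out : Int) : Prop := out = solve_alt n
instance (n : Int) (out : Int) : Decidable (Spec_solve n out) := by unfold Spec_solve; infer_instance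

-- ===== CLAIM (what is proved, stated in full; the proofs are below) =====
def Claim_equal_solve : Prop := ∀ (n : Int), Dom_solve n → Pre_solve n → Spec_solve n (solve n)

-- ===== LEMMAS AND PROOFS =====

-- the exact sequence A tabulates
def g : Nat → Int
  | 0 => 0
  | 1 => 1
  | 2 => 3
  | (k + 3) => (g (k + 2) + 2 * g (k + 1)) % 10007

def dpList (N m : Nat) : List Int := (List.range (N + 1)).map (fun j => if j ≤ m then g j else 0)

lemma g_bounds : ∀ k, 0 ≤ g k ∧ g k < 10007
  | 0 => by decide
  | 1 => by decide
  | 2 => by decide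
  | (k + 3) => by
      constructor
      · exact Int.emod_nonneg _ (by norm_num)
      · exact Int.emod_lt_of_pos _ (by norm_num)

lemma g_rec (k : Nat) : g (k + 3) = (g (k + 2) + 2 * g (k + 1)) % 10007 := by rw [g]

lemma dpList_getD (N m j : Nat) (h : j ≤ N) :
    (dpList N m).getD j 0 = if j ≤ m then g j else 0 := by
  simp [dpList, List.getD_eq_getElem?_getD, Nat.lt_succ_of_le h]

lemma dpList_set (N m : Nat) (_h : m + 1 ≤ N) :
    (dpList N m).set (m + 1) (g (m + 1)) = dpList N (m + 1) := by
  apply List.ext_getElem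
  · simp [dpList]
  · intro j h1 h2
    simp only [dpList, List.getElem_map, List.getElem_range]
    rw [List.getElem_set]
    by_cases hj : m + 1 = j
    · subst hj
      rw [if_pos rfl, if_pos (le_refl (m + 1))]
    · rw [if_neg hj]
      simp only [List.getElem_map, List.getElem_range]
      by_cases hjm : j ≤ m
      · rw [if_pos hjm, if_pos (by omega : j ≤ m + 1)]
      · rw [if_neg hjm, if_neg (by omega : ¬ j ≤ m + 1)]

lemma init_eq (N : Nat) (_h : 2 ≤ N) :
    ((List.replicate (N + 1) (0 : Int)).set 1 1).set 2 3 = dpList N 2 := by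
  apply List.ext_getElem
  · simp [dpList]
  · intro j h1 h2
    simp only [dpList, List.getElem_set, List.getElem_map, List.getElem_range,
      List.getElem_replicate]
    rcases j with _ | _ | _ | j
    · simp [g]
    · simp [g]
    · simp [g]
    · have : ¬ (j + 3 ≤ 2) := by omega
      simp [this]

lemma array_getD (a : Array Int) (i : Nat) (d : Int) : a.getD i d = a.toList.getD i d := by
  unfold Array.getD
  split
  · rename_i hlt
    rw [List.getD_eq_getElem?_getD, List.getElem?_eq_getElem (by simpa using hlt)]
    simp
  · rename_i hge
    rw [List.getD_eq_getElem?_getD, List.getElem?_eq_none (by simp; omega)]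
    rfl

lemma fold_inv (N : Nat) (_hN : 2 ≤ N) : ∀ m : Nat, 2 ≤ m → m ≤ N →
    (PySem.List.pyRange 3 ((m : Int) + 1) 1).foldl
      (fun dp i => dp.set i.toNat
        (PySem.Int.mod (dp.getD (i - 1).toNat 0 + 2 * dp.getD (i - 2).toNat 0) 10007))
      (dpList N 2) = dpList N m := by
  intro m
  induction m with
  | zero => omega
  | succ m ih =>
    intro h2 hle
    by_cases hm : 2 ≤ m
    · -- split off the last index m+1
      obtain ⟨k, rfl⟩ : ∃ k, m = k + 2 := ⟨m - 2, by omega⟩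
      have hsplit : PySem.List.pyRange 3 ((↑(k + 2 + 1) : Int) + 1) 1
          = PySem.List.pyRange 3 ((↑(k + 2) : Int) + 1) 1 ++ [(↑(k + 2) : Int) + 1] := by
        have h : ((↑(k + 2 + 1) : Int) + 1) = ((↑(k + 2) : Int) + 1) + 1 := by push_cast; ring
        rw [h, PySem.List.pyRange_one_succ_right (by push_cast; omega)]
      rw [hsplit, List.foldl_append, ih hm (by omega)]
      simp only [List.foldl_cons, List.foldl_nil]
      have e1 : ((↑(k + 2) : Int) + 1 - 1).toNat = k + 2 := by omega
      have e2 : ((↑(k + 2) : Int) + 1 - 2).toNat = k + 1 := by omega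
      have e3 : ((↑(k + 2) : Int) + 1).toNat = k + 3 := by omega
      rw [e1, e2, e3]
      have hd1 : (dpList N (k + 2)).getD (k + 2) 0 = g (k + 2) := by
        rw [dpList_getD N (k + 2) (k + 2) (by omega)]; rw [if_pos (by omega)]
      have hd2 : (dpList N (k + 2)).getD (k + 1) 0 = g (k + 1) := by
        rw [dpList_getD N (k + 2) (k + 1) (by omega)]; rw [if_pos (by omega)]
      rw [hd1, hd2, PySem.Int.mod_eq_emod_of_pos (by norm_num), ← g_rec k]
      rw [show k + 3 = (k + 2) + 1 by omega, dpList_set N (k + 2) (by omega)]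
    · -- m + 1 = 2 : empty range
      have hm2 : m + 1 = 2 := by omega
      rw [hm2]
      rw [PySem.List.pyRange_one_eq_nil (by norm_num)]
      rfl

-- A computes g
lemma solve_eq_g (n : Int) (h : 1 ≤ n) : solve n = g n.toNat := by
  by_cases h1 : n = 1
  · subst h1; decide
  · have h2 : 2 ≤ n := by omega
    obtain ⟨N, rfl⟩ : ∃ N : Nat, n = (N : Int) := ⟨n.toNat, by omega⟩
    have hN : 2 ≤ N := by exact_mod_cast h2
    unfold solve
    rw [if_neg h1]
    have hrep : ((N : Int) + 1).toNat = N + 1 := by omega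
    have hfold : ∀ (l : List Int) (a : Array Int),
        ((l.foldl (fun dp i => dp.setIfInBounds i.toNat
            (PySem.Int.mod (dp.getD (i - 1).toNat 0 + 2 * dp.getD (i - 2).toNat 0) 10007)) a).toList)
          = l.foldl (fun dp i => dp.set i.toNat
            (PySem.Int.mod (dp.getD (i - 1).toNat 0 + 2 * dp.getD (i - 2).toNat 0) 10007)) a.toList := by
      intro l
      induction l with
      | nil => intro a; rfl
      | cons x xs ih =>
        intro a
        rw [List.foldl_cons, List.foldl_cons, ih, Array.toList_setIfInBounds,
          array_getD, array_getD]
    show Array.getD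
        ((PySem.List.pyRange 3 ((N : Int) + 1) 1).foldl
          (fun dp i => dp.setIfInBounds i.toNat
            (PySem.Int.mod (dp.getD (i - 1).toNat 0 + 2 * dp.getD (i - 2).toNat 0) 10007))
          (((Array.replicate ((N : Int) + 1).toNat (0 : Int)).setIfInBounds 1 1).setIfInBounds 2 3))
        ((N : Int)).toNat 0 = g ((N : Int)).toNat
    rw [array_getD, hfold]
    have hinit : (((Array.replicate ((N : Int) + 1).toNat (0 : Int)).setIfInBounds 1 1).setIfInBounds 2 3).toList
        = dpList N 2 := by
      rw [Array.toList_setIfInBounds, Array.toList_setIfInBounds, Array.toList_replicate, hrep]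
      exact init_eq N hN
    rw [hinit, fold_inv N hN N hN (le_refl N), Int.toNat_natCast,
      dpList_getD N N N (le_refl N), if_pos (le_refl N)]

-- closed form in ZMod 10007
def F (k : Nat) : ZMod 10007 := (2 ^ (k + 1) + (-1) ^ k) * 3336

lemma cast_emod (a : Int) : ((a % 10007 : Int) : ZMod 10007) = (a : ZMod 10007) := by
  conv_rhs => rw [← Int.emod_add_mul_ediv a 10007]
  push_cast
  have h : ((10007 : Int) : ZMod 10007) = 0 := by decide
  push_cast at h
  rw [h]
  ring

lemma g_cast : ∀ k : Nat, ((g (k + 1) : Int) : ZMod 10007) = F (k + 1) ∧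
    ((g (k + 2) : Int) : ZMod 10007) = F (k + 2)
  | 0 => by constructor <;> (unfold F g; decide)
  | (k + 1) => by
      obtain ⟨ih1, ih2⟩ := g_cast k
      refine ⟨ih2, ?_⟩
      show ((g (k + 3) : Int) : ZMod 10007) = F (k + 3)
      rw [g, cast_emod]
      push_cast
      rw [ih1, ih2]
      unfold F
      ring

-- two Ints in [0, 10007) with equal images in ZMod 10007 are equal
lemma int_eq_of_cast (a b : Int) (ha0 : 0 ≤ a) (ha : a < 10007) (hb0 : 0 ≤ b) (hb : b < 10007)
    (h : ((a : ZMod 10007) = (b : ZMod 10007))) : a = b := by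
  rw [ZMod.intCast_eq_intCast_iff] at h
  unfold Int.ModEq at h
  push_cast at h
  omega

lemma powMod10007_cast (b : Int) : ∀ e : Nat,
    ((powMod10007 b e : Int) : ZMod 10007) = (b : ZMod 10007) ^ e ∧
      0 ≤ powMod10007 b e ∧ powMod10007 b e < 10007
  | e => by
    rw [powMod10007]
    by_cases h0 : e = 0
    · subst h0
      rw [if_pos rfl, show PySem.Int.mod 1 10007 = 1 from by decide]
      refine ⟨by push_cast; ring, by decide, by decide⟩
    · rw [if_neg h0]
      have hlt : e / 2 < e := Nat.div_lt_self (Nat.pos_of_ne_zero h0) (by norm_num)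
      obtain ⟨ihc, ih0, ih1⟩ := powMod10007_cast b (e / 2)
      have hm : ∀ a : Int, PySem.Int.mod a 10007 = a % 10007 :=
        fun a => PySem.Int.mod_eq_emod_of_pos (by norm_num)
      have hsq : (((powMod10007 b (e / 2) * powMod10007 b (e / 2)) % 10007 : Int)
          : ZMod 10007) = (b : ZMod 10007) ^ (e / 2 * 2) := by
        rw [cast_emod]
        push_cast
        rw [ihc, ← pow_add]
        ring_nf
      simp only [hm]
      by_cases hodd : e % 2 = 1
      · rw [if_pos hodd]
        refine ⟨?_, Int.emod_nonneg _ (by norm_num), Int.emod_lt_of_pos _ (by norm_num)⟩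
        rw [cast_emod]
        push_cast
        rw [hsq, ← pow_succ]
        congr 1
        omega
      · rw [if_neg hodd]
        refine ⟨?_, Int.emod_nonneg _ (by norm_num), Int.emod_lt_of_pos _ (by norm_num)⟩
        rw [hsq]
        congr 1
        omega

lemma solve_alt_cast (n : Int) (h : 1 ≤ n) :
    ((solve_alt n : Int) : ZMod 10007) = F n.toNat ∧ 0 ≤ solve_alt n ∧ solve_alt n < 10007 := by
  obtain ⟨N, rfl⟩ : ∃ N : Nat, n = (N : Int) := ⟨n.toNat, by omega⟩
  unfold solve_alt
  rw [if_pos (by omega : (0:Int) ≤ (N : Int) + 1)]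
  have he : ((N : Int) + 1).toNat = N + 1 := by omega
  rw [he]
  rw [PySem.Int.mod_eq_emod_of_pos (by norm_num)]
  obtain ⟨hpc, hp0, hp1⟩ := powMod10007_cast 2 (N + 1)
  refine ⟨?_, Int.emod_nonneg _ (by norm_num), Int.emod_lt_of_pos _ (by norm_num)⟩
  rw [cast_emod, Int.cast_mul, Int.cast_add, hpc]
  have hsign : (((if PySem.Int.mod ((N : Int)) 2 = 0 then (1:Int) else -1) : Int) : ZMod 10007)
      = (-1) ^ N := by
    rcases Nat.even_or_odd N with he' | ho
    · have hc : PySem.Int.mod ((N : Int)) 2 = 0 := by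
        rw [PySem.Int.mod_eq_emod_of_pos (by norm_num)]
        obtain ⟨c, rfl⟩ := he'
        push_cast
        omega
      rw [if_pos hc, he'.neg_one_pow]
      norm_num
    · have hc : ¬ PySem.Int.mod ((N : Int)) 2 = 0 := by
        rw [PySem.Int.mod_eq_emod_of_pos (by norm_num)]
        obtain ⟨c, rfl⟩ := ho
        push_cast
        omega
      rw [if_neg hc, ho.neg_one_pow]
      push_cast
      ring
  rw [hsign, Int.toNat_natCast]
  unfold F
  push_cast
  ring

-- ===== VERDICT (by name: the statement is the Claim_ definition above) =====
theorem solve_spec : Claim_equal_solve := by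
  intro n _ hpre
  show solve n = solve_alt n
  have h1 : (1:Int) ≤ n := hpre
  obtain ⟨hc, hb0, hb1⟩ := solve_alt_cast n h1
  have hga := solve_eq_g n h1
  have hN1 : 1 ≤ n.toNat := by omega
  have hgc : ((g n.toNat : Int) : ZMod 10007) = F n.toNat := by
    obtain ⟨k, hk⟩ : ∃ k, n.toNat = k + 1 := ⟨n.toNat - 1, by omega⟩
    rw [hk]
    exact (g_cast k).1
  obtain ⟨hg0, hg1⟩ := g_bounds n.toNat
  apply int_eq_of_cast _ _ (by rw [hga]; exact hg0) (by rw [hga]; exact hg1) hb0 hb1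
  rw [hga, hgc, hc]
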